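-- pv_equiv track=rewrite | github.com/Tayjsl97/EmoMusicTV | melodyVAE_eval.py | getBar
-- ===== SOURCE A (Python) =====
-- def getBar(melody):
--     barList=[]
--     durSum=0
--     bar_cnt=0
--     for i in range(len(melody)):
--         if melody[i]==0:
--             if bar_cnt!=0:
--                 barList.append(durSum)
--             durSum=0
--             bar_cnt+=1
--         if melody[i]>61 and melody[i]<99:
--             durSum+=DURATION[melody[i]-62]
--     barList.append(durSum)
--     return barList
--
-- DURATION={0:2, 1:4, 2:6, 3:8, 4:10, 5:12, 6:16, 7:18, 8:20, 9:22, 10:24, 11:30, 12:32, 13:36, 14:42, 15:44, 16:48, 17:54, 18:56, 19:60,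
-- 20:64, 21:66, 22:68, 23:72, 24:78, 25:80, 26:84, 27:90, 28:92, 29:96, 30:102, 31:108, 32:120, 33:126, 34:132, 35:138, 36:144}
-- ===== SOURCE B (Python) =====
-- DURATION={0:2, 1:4, 2:6, 3:8, 4:10, 5:12, 6:16, 7:18, 8:20, 9:22, 10:24, 11:30, 12:32, 13:36, 14:42, 15:44, 16:48, 17:54, 18:56, 19:60,
-- 20:64, 21:66, 22:68, 23:72, 24:78, 25:80, 26:84, 27:90, 28:92, 29:96, 30:102, 31:108, 32:120, 33:126, 34:132, 35:138, 36:144}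
--
-- def getBar(melody):
--     # partition into bar groups at each 0, then reduce each group to its duration sum
--     groups = [[]]
--     for v in melody:
--         if v == 0:
--             groups.append([])
--         else:
--             groups[-1].append(v)
--     sums = [sum(DURATION[v - 62] for v in g if 61 < v < 99) for g in groups]
--     # the tokens before the first 0 belong to no bar; with no 0 at all the whole melody is one bar
--     return sums[1:] if len(sums) > 1 else sums
-- ===== Notes on version B (the rewrite author's own statement) =====
-- stated objective: alternative
-- what changed: B partitions the melody into bar groups at the 0 delimiters and then maps a group-sum reducer over them (dropping the pre-first-zero group when a 0 exists), instead of A's single flat loop maintaining a running sum plus a bar-count flag.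
import Mathlib
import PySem

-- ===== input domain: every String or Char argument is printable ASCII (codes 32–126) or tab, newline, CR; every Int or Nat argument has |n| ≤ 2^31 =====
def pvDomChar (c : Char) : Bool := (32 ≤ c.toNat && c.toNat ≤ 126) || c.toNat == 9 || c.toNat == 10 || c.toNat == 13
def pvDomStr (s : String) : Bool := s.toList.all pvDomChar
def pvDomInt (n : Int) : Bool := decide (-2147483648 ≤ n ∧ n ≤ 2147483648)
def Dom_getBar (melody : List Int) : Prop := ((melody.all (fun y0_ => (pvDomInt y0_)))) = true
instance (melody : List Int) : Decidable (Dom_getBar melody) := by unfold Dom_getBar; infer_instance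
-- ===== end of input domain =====

-- B partitions the melody into bar groups at the 0 delimiters and maps a group-sum reducer,
-- instead of A's flat loop with a running sum and a bar-count flag (objective: alternative).

-- the module-level DURATION dict (keys 0..36); the in-range guard 61 < v < 99 makes every
-- lookup hit an existing key, so the .getD 0 default is never taken (exact on the domain)
def DURATION : PySem.Dict Int Int := PySem.Dict.mk
  [(0,2),(1,4),(2,6),(3,8),(4,10),(5,12),(6,16),(7,18),(8,20),(9,22),(10,24),(11,30),(12,32),
   (13,36),(14,42),(15,44),(16,48),(17,54),(18,56),(19,60),(20,64),(21,66),(22,68),(23,72),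
   (24,78),(25,80),(26,84),(27,90),(28,92),(29,96),(30,102),(31,108),(32,120),(33,126),
   (34,132),(35,138),(36,144)]

-- ===== PORT A =====
-- state: (barList, durSum, bar_cnt); both sequential ifs of A's loop body are kept
def getBarStep (st : List Int × Int × Int) (v : Int) : List Int × Int × Int :=
  let st1 := if v = 0 then
      ((if st.2.2 ≠ 0 then st.1 ++ [st.2.1] else st.1), 0, st.2.2 + 1)
    else st
  if 61 < v ∧ v < 99 then
    (st1.1, st1.2.1 + (DURATION.get? (v - 62)).getD 0, st1.2.2)
  else st1

def getBar (melody : List Int) : List Int :=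
  let st := melody.foldl getBarStep ([], 0, 0)
  st.1 ++ [st.2.1]

-- ===== PORT B =====
-- duration sum of one bar group
def gsum (g : List Int) : Int :=
  g.foldl (fun s v => if 61 < v ∧ v < 99 then s + (DURATION.get? (v - 62)).getD 0 else s) 0

-- groups[-1].append(v) / groups.append([]) kept as (finished groups, current group)
def splitStep (acc : List (List Int) × List Int) (v : Int) : List (List Int) × List Int :=
  if v = 0 then (acc.1 ++ [acc.2], []) else (acc.1, acc.2 ++ [v])

def getBar_alt (melody : List Int) : List Int :=
  let acc := melody.foldl splitStep ([], [])
  let sums := (acc.1 ++ [acc.2]).map gsum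
  if sums.length > 1 then sums.drop 1 else sums

-- ===== PRECONDITION & SPEC =====
def Spec_getBar (melody : List Int) (out : List Int) : Prop := out = getBar_alt melody
instance (melody : List Int) (out : List Int) : Decidable (Spec_getBar melody out) := by unfold Spec_getBar; infer_instance

-- ===== CLAIM (what is proved, stated in full; the proofs are below) =====
def Claim_equal_getBar : Prop := ∀ (melody : List Int), Dom_getBar melody → Spec_getBar melody (getBar melody)

-- ===== LEMMAS AND PROOFS =====

lemma gsum_concat (g : List Int) (v : Int) :
    gsum (g ++ [v]) = if 61 < v ∧ v < 99 then gsum g + (DURATION.get? (v - 62)).getD 0 else gsum g := by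
  simp [gsum, List.foldl_append]

-- loop invariant: A's state is the image of B's splitter state
lemma loop_inv (ms : List Int) : ∀ (done : List (List Int)) (cur : List Int),
    ms.foldl getBarStep ((done.drop 1).map gsum, gsum cur, (done.length : Int)) =
      (((ms.foldl splitStep (done, cur)).1.drop 1).map gsum,
        gsum (ms.foldl splitStep (done, cur)).2,
        ((ms.foldl splitStep (done, cur)).1.length : Int)) := by
  induction ms with
  | nil => intro done cur; rfl
  | cons v ms ih =>
    intro done cur
    by_cases hv : v = 0
    · subst hv
      have hA : getBarStep ((done.drop 1).map gsum, gsum cur, (done.length : Int)) 0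
          = (((done ++ [cur]).drop 1).map gsum, gsum ([] : List Int), ((done ++ [cur]).length : Int)) := by
        cases done with
        | nil => simp [getBarStep, gsum]
        | cons d ds =>
            simp [getBarStep, gsum]
            omega
      have hB : splitStep (done, cur) 0 = (done ++ [cur], []) := by simp [splitStep]
      simp only [List.foldl_cons, hA, hB]
      exact ih (done ++ [cur]) []
    · have hA : getBarStep ((done.drop 1).map gsum, gsum cur, (done.length : Int)) v
          = ((done.drop 1).map gsum, gsum (cur ++ [v]), (done.length : Int)) := by
        rw [gsum_concat]
        by_cases hr : 61 < v ∧ v < 99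
        · simp [getBarStep, hv, hr]
        · simp [getBarStep, hv, hr]
      have hB : splitStep (done, cur) v = (done, cur ++ [v]) := by simp [splitStep, hv]
      simp only [List.foldl_cons, hA, hB]
      exact ih done (cur ++ [v])

-- ===== VERDICT (by name: the statement is the Claim_ definition above) =====
theorem getBar_spec : Claim_equal_getBar := by
  intro melody _
  unfold Spec_getBar getBar getBar_alt
  have h := loop_inv melody [] []
  have h0 : gsum ([] : List Int) = 0 := rfl
  simp only [List.drop_nil, List.map_nil, List.length_nil, Nat.cast_zero, h0] at h
  rw [h]
  set acc := melody.foldl splitStep ([], []) with hacc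
  cases acc with
  | mk done cur =>
    cases done with
    | nil => simp
    | cons d ds =>
      simp [List.map_append]
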